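-- pv_equiv track=rewrite | github.com/ianz56/lyrics-ttml | lint_ttml.py | find_tag_end
-- ===== SOURCE A (Python) =====
-- def find_tag_end(content, start):
--     """Find the closing > of a tag, respecting quoted attribute values."""
--     pos = start + 1
--     in_quote = None
--     while pos < len(content):
--         ch = content[pos]
--         if in_quote:
--             if ch == in_quote:
--                 in_quote = None
--         elif ch in ('"', "'"):
--             in_quote = ch
--         elif ch == ">":
--             return pos
--         pos += 1
--     return -1
-- ===== SOURCE B (Python) =====
-- def find_tag_end(content, start):
--     """Find the closing > of a tag, respecting quoted attribute values.
--
--     Jump-between-events scan: instead of inspecting every character, hop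
--     directly to the next interesting character with str.find.
--     """
--     pos = start + 1
--     n = len(content)
--     in_quote = None
--     while True:
--         if in_quote is None:
--             hits = [content.find(ch, pos) for ch in ('"', "'", ">")]
--             m = min(n if h == -1 else h for h in hits)
--             if m == n:
--                 return -1
--             if content[m] == ">":
--                 return m
--             in_quote = content[m]
--             pos = m + 1
--         else:
--             j = content.find(in_quote, pos)
--             if j == -1:
--                 return -1
--             in_quote = None
--             pos = j + 1
-- ===== Notes on version B (the rewrite author's own statement) =====
-- stated objective: faster
-- what changed: Replaced A's one-character-at-a-time Python state machine by an event-jump scan that uses str.find to hop directly to the next quote or '>' (and, inside a quote, to the matching closing quote), so runs of ordinary characters are skipped at C speed instead of looped over in Python.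
-- outside the precondition, e.g. on find_tag_end('>', -2): A returns -1, B returns 0
import Mathlib
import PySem

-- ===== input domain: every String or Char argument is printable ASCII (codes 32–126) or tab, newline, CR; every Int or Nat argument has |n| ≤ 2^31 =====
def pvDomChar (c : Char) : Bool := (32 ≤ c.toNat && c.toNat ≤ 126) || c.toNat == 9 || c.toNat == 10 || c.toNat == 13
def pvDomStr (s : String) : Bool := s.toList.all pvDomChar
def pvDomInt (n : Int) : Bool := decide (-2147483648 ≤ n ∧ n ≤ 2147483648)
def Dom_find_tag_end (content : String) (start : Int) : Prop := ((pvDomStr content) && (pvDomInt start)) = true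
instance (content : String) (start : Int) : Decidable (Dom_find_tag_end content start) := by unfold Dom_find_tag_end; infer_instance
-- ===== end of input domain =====

-- B replaces A's per-character state machine by an event-jump scan via str.find (measured
-- faster in a timing run); equivalence is proved for start ≥ -1 (see Pre_ below).

-- ===== PORT A =====
-- A's while loop: pos walks one character at a time; in_quote is the pending quote character.
-- fuel = exact number of remaining iterations (len - pos), so fuel 0 coincides with the
-- loop's exit condition pos >= len; it only makes the recursion structural.
def findTagEndGoA (cs : List Char) (fuel : Nat) (pos : Int) (q : Option Char) : Int :=
  match fuel with
  | 0 => -1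
  | f + 1 =>
    if pos < (cs.length : Int) then
      -- content[pos]: IndexError only reachable for pos < -len(content), outside Pre_
      let ch := PySem.List.pyGetD cs pos ' '
      match q with
      | some qc => if ch = qc then findTagEndGoA cs f (pos + 1) none
                   else findTagEndGoA cs f (pos + 1) (some qc)
      | none =>
        if ch = '"' ∨ ch = '\'' then findTagEndGoA cs f (pos + 1) (some ch)
        else if ch = '>' then pos
        else findTagEndGoA cs f (pos + 1) none
    else -1

-- ===== PORT B =====
-- B's while True loop; fuel only makes the recursion structural (cs.length + 2 bounds the
-- number of iterations: pos strictly increases and stays ≤ len after the first jump).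
def findTagEndGoB (cs : List Char) (fuel : Nat) (pos : Int) (q : Option Char) : Int :=
  match fuel with
  | 0 => -1
  | f + 1 =>
    match q with
    | none =>
      let n : Int := cs.length
      let h1 := PySem.Chars.findFrom cs ['"'] pos
      let h2 := PySem.Chars.findFrom cs ['\''] pos
      let h3 := PySem.Chars.findFrom cs ['>'] pos
      let m := min (min (if h1 = -1 then n else h1) (if h2 = -1 then n else h2))
                   (if h3 = -1 then n else h3)
      if m = n then -1
      else
        let ch := PySem.List.pyGetD cs m ' '   -- content[m]: m is a hit index, 0 ≤ m < len
        if ch = '>' then m else findTagEndGoB cs f (m + 1) (some ch)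
    | some qc =>
      let j := PySem.Chars.findFrom cs [qc] pos
      if j = -1 then -1 else findTagEndGoB cs f (j + 1) none


def find_tag_end (content : String) (start : Int) : Int :=
  findTagEndGoA content.toList ((content.toList.length : Int) - (start + 1)).toNat (start + 1) none

def find_tag_end_alt (content : String) (start : Int) : Int :=
  findTagEndGoB content.toList (content.toList.length + 2) (start + 1) none

-- ===== PRECONDITION & SPEC =====
-- Pre_ excludes start < -1: there A either raises IndexError (start+1 < -len) or its
-- negative-index wraparound rescans the string from the end (it can even return -1 for a '>'
-- found at content[-1]) — both corner behaviours are accidents of Python indexing for an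
-- index-based helper (callers always pass the index of '<', so start ≥ 0), so neither is claimed.
def Pre_find_tag_end (content : String) (start : Int) : Prop := -1 ≤ start
instance (content : String) (start : Int) : Decidable (Pre_find_tag_end content start) := by
  unfold Pre_find_tag_end; infer_instance

def pvWitness_find_tag_end : String × Int := ("<a href=\"x>y\">", 0)

def Spec_find_tag_end (content : String) (start : Int) (out : Int) : Prop := out = find_tag_end_alt content start
instance (content : String) (start : Int) (out : Int) : Decidable (Spec_find_tag_end content start out) := by unfold Spec_find_tag_end; infer_instance

-- ===== CLAIM (what is proved, stated in full; the proofs are below) =====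
def Claim_equal_find_tag_end : Prop := ∀ (content : String) (start : Int), Dom_find_tag_end content start → Pre_find_tag_end content start → Spec_find_tag_end content start (find_tag_end content start)

-- ===== LEMMAS AND PROOFS =====

lemma pv_findFrom_past (cs : List Char) (c : Char) (k : Nat) (h : cs.length ≤ k) :
    PySem.Chars.findFrom cs [c] (k : Int) none = -1 := by
  rcases Nat.eq_or_lt_of_le h with heq | hlt
  · rw [PySem.Chars.findFrom_natCast cs [c] k (by omega)]
    have : cs.drop k = [] := List.drop_eq_nil_of_le h
    simp [this, PySem.Chars.find_eq_neg_one_iff]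
  · simp only [PySem.Chars.findFrom]
    split_ifs with h1 <;> omega

lemma pv_findFrom_bounds (cs : List Char) (c : Char) (k : Nat) (hk : k ≤ cs.length)
    (h : PySem.Chars.findFrom cs [c] (k : Int) none ≠ -1) :
    (k : Int) ≤ PySem.Chars.findFrom cs [c] (k : Int) none ∧
      PySem.Chars.findFrom cs [c] (k : Int) none < (cs.length : Int) := by
  obtain ⟨hge, hpref, -⟩ := PySem.Chars.findFrom_natCast_spec cs [c] k hk h
  refine ⟨hge, ?_⟩
  have hne : cs.drop (PySem.Chars.findFrom cs [c] (k : Int) none).toNat ≠ [] := by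
    intro hnil; rw [hnil] at hpref; simp at hpref
  by_contra hge2
  exact hne (List.drop_eq_nil_of_le (by omega))

lemma pv_findFrom_hit (cs : List Char) (c : Char) (k : Nat) (hk : k < cs.length)
    (hc : cs[k] = c) : PySem.Chars.findFrom cs [c] (k : Int) none = (k : Int) := by
  have hdrop : cs.drop k = c :: cs.drop (k+1) := by
    rw [List.drop_eq_getElem_cons hk, hc]
  have hpk : [c] <+: cs.drop k := by rw [hdrop]; simp [List.cons_prefix_cons]
  have hne : PySem.Chars.findFrom cs [c] (k : Int) none ≠ -1 := by
    rw [Ne, PySem.Chars.findFrom_natCast_eq_neg_one_iff cs [c] k (by omega)]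
    simp only [not_not]
    exact hpk.isInfix
  obtain ⟨hge, hpref, hmin⟩ := PySem.Chars.findFrom_natCast_spec cs [c] k (by omega) hne
  by_contra hne2
  have hlt : k < (PySem.Chars.findFrom cs [c] (k : Int) none).toNat := by omega
  exact hmin k le_rfl hlt hpk

lemma pv_findFrom_step (cs : List Char) (c : Char) (k : Nat) (hk : k < cs.length)
    (hc : cs[k] ≠ c) :
    PySem.Chars.findFrom cs [c] (k : Int) none = PySem.Chars.findFrom cs [c] ((k : Int) + 1) none := by
  have hcast : ((k : Int) + 1) = ((k + 1 : Nat) : Int) := by push_cast; ring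
  rw [hcast]
  have hdrop : cs.drop k = cs[k] :: cs.drop (k+1) := List.drop_eq_getElem_cons hk
  have hnopk : ¬ [c] <+: cs.drop k := by
    intro hp; rw [hdrop, List.cons_prefix_cons] at hp; exact hc hp.1.symm
  by_cases h1 : PySem.Chars.findFrom cs [c] ((k+1 : Nat) : Int) none = -1
  · rw [h1]
    rw [PySem.Chars.findFrom_natCast_eq_neg_one_iff cs [c] k (by omega)]
    rw [PySem.Chars.findFrom_natCast_eq_neg_one_iff cs [c] (k+1) (by omega)] at h1
    intro hinf
    rw [hdrop, List.infix_cons_iff] at hinf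
    rcases hinf with hpre | hinf
    · exact hnopk (by rw [hdrop]; exact hpre)
    · exact h1 hinf
  · obtain ⟨hge1, hpref1, hmin1⟩ := PySem.Chars.findFrom_natCast_spec cs [c] (k+1) (by omega) h1
    set j := PySem.Chars.findFrom cs [c] ((k+1 : Nat) : Int) none with hj
    have h0 : PySem.Chars.findFrom cs [c] (k : Int) none ≠ -1 := by
      rw [Ne, PySem.Chars.findFrom_natCast_eq_neg_one_iff cs [c] k (by omega)]
      simp only [not_not]
      have : cs.drop j.toNat <:+ cs.drop k := by
        have : cs.drop j.toNat = (cs.drop k).drop (j.toNat - k) := by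
          rw [List.drop_drop]; congr 1; omega
        rw [this]; exact List.drop_suffix _ _
      exact hpref1.isInfix.trans this.isInfix
    obtain ⟨hge0, hpref0, hmin0⟩ := PySem.Chars.findFrom_natCast_spec cs [c] k (by omega) h0
    set i := PySem.Chars.findFrom cs [c] (k : Int) none with hi
    have hik : i.toNat ≠ k := by
      intro he; rw [← he] at hnopk; exact hnopk hpref0
    have h1' : ¬ i.toNat < j.toNat → ¬ j.toNat < i.toNat → i = j := by
      intro a b; omega
    apply h1'
    · intro hlt
      exact hmin1 i.toNat (by omega) hlt hpref0
    · intro hlt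
      exact hmin0 j.toNat (by omega) hlt hpref1

-- past the end both sides return -1
lemma pv_base (cs : List Char) (p : Nat) (q : Option Char) (fuel : Nat)
    (hp : cs.length ≤ p) (hfuel : 0 < fuel) :
    findTagEndGoA cs (cs.length - p) (p : Int) q = findTagEndGoB cs fuel (p : Int) q := by
  obtain ⟨f, rfl⟩ : ∃ f, fuel = f + 1 := ⟨fuel - 1, by omega⟩
  rw [show cs.length - p = 0 from by omega]
  rcases q with _ | qc
  · simp only [findTagEndGoA, findTagEndGoB, pv_findFrom_past cs _ p hp]
    simp
  · simp only [findTagEndGoA, findTagEndGoB, pv_findFrom_past cs _ p hp]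
    simp

lemma pv_main (cs : List Char) : ∀ (N p : Nat) (q : Option Char) (fuel : Nat),
    cs.length - p ≤ N → cs.length - p < fuel →
    findTagEndGoA cs (cs.length - p) (p : Int) q = findTagEndGoB cs fuel (p : Int) q := by
  intro N
  induction N with
  | zero =>
    intro p q fuel hN hfuel
    exact pv_base cs p q fuel (by omega) (by omega)
  | succ N IH =>
    intro p q fuel hN hfuel
    by_cases hp : cs.length ≤ p
    · exact pv_base cs p q fuel hp (by omega)
    · have hplt : p < cs.length := by omega
      obtain ⟨f, rfl⟩ : ∃ f, fuel = f + 1 := ⟨fuel - 1, by omega⟩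
      have hget : PySem.List.pyGetD cs ((p : Nat) : Int) ' ' = cs[p] := by
        simp [PySem.List.pyGetD_natCast, List.getD, List.getElem?_eq_getElem hplt]
      have hcast : ((p : Int) + 1) = ((p + 1 : Nat) : Int) := by push_cast; ring
      rw [show cs.length - p = (cs.length - (p + 1)) + 1 from by omega]
      rw [findTagEndGoA, if_pos (show ((p : Int)) < (cs.length : Int) from by exact_mod_cast hplt)]
      simp only [hget]
      rcases q with _ | qc <;> dsimp only
      · -- event-scan mode
        have hb2 : ∀ c : Char, (if PySem.Chars.findFrom cs [c] (p:Int) none = -1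
            then (cs.length : Int) else PySem.Chars.findFrom cs [c] (p:Int) none) ≥ (p:Int) ∧
            (if PySem.Chars.findFrom cs [c] (p:Int) none = -1
            then (cs.length : Int) else PySem.Chars.findFrom cs [c] (p:Int) none) ≤ (cs.length : Int) := by
          intro c
          by_cases hc : PySem.Chars.findFrom cs [c] (p:Int) none = -1
          · simp [hc]; omega
          · obtain ⟨h1, h2⟩ := pv_findFrom_bounds cs c p (by omega) hc
            simp [hc]; omega
        have hpn : ¬ ((p : Int) = -1) := by omega
        by_cases hq1 : cs[p] = '"'
        · rw [if_pos (Or.inl hq1)]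
          simp only [findTagEndGoB]
          have h2 := hb2 '\''
          have h3 := hb2 '>'
          rw [pv_findFrom_hit cs '"' p hplt hq1, if_neg hpn]
          set v2 := (if PySem.Chars.findFrom cs ['\''] (p:Int) none = -1
            then (cs.length : Int) else PySem.Chars.findFrom cs ['\''] (p:Int) none) with hv2
          set v3 := (if PySem.Chars.findFrom cs ['>'] (p:Int) none = -1
            then (cs.length : Int) else PySem.Chars.findFrom cs ['>'] (p:Int) none) with hv3
          rw [show min (min ((p:Int)) v2) v3 = ((p:Int)) from by omega]
          rw [if_neg (show ¬ ((p:Int)) = ((cs.length : Int)) from by omega)]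
          rw [hget, if_neg (show ¬ cs[p] = '>' from by rw [hq1]; decide), hcast]
          exact IH (p+1) (some cs[p]) f (by omega) (by omega)
        · by_cases hq2 : cs[p] = '\''
          · rw [if_pos (Or.inr hq2)]
            simp only [findTagEndGoB]
            have h1 := hb2 '"'
            have h3 := hb2 '>'
            rw [pv_findFrom_hit cs '\'' p hplt hq2, if_neg hpn]
            set v1 := (if PySem.Chars.findFrom cs ['"'] (p:Int) none = -1
              then (cs.length : Int) else PySem.Chars.findFrom cs ['"'] (p:Int) none) with hv1
            set v3 := (if PySem.Chars.findFrom cs ['>'] (p:Int) none = -1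
              then (cs.length : Int) else PySem.Chars.findFrom cs ['>'] (p:Int) none) with hv3
            rw [show min (min v1 ((p:Int))) v3 = ((p:Int)) from by omega]
            rw [if_neg (show ¬ ((p:Int)) = ((cs.length : Int)) from by omega)]
            rw [hget, if_neg (show ¬ cs[p] = '>' from by rw [hq2]; decide), hcast]
            exact IH (p+1) (some cs[p]) f (by omega) (by omega)
          · by_cases hq3 : cs[p] = '>'
            · rw [if_neg (not_or.mpr ⟨hq1, hq2⟩), if_pos hq3]
              simp only [findTagEndGoB]
              have h1 := hb2 '"'
              have h2 := hb2 '\''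
              rw [pv_findFrom_hit cs '>' p hplt hq3, if_neg hpn]
              set v1 := (if PySem.Chars.findFrom cs ['"'] (p:Int) none = -1
                then (cs.length : Int) else PySem.Chars.findFrom cs ['"'] (p:Int) none) with hv1
              set v2 := (if PySem.Chars.findFrom cs ['\''] (p:Int) none = -1
                then (cs.length : Int) else PySem.Chars.findFrom cs ['\''] (p:Int) none) with hv2
              rw [show min (min v1 v2) ((p:Int)) = ((p:Int)) from by omega]
              rw [if_neg (show ¬ ((p:Int)) = ((cs.length : Int)) from by omega)]
              rw [hget, if_pos hq3]
            · rw [if_neg (not_or.mpr ⟨hq1, hq2⟩), if_neg hq3]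
              have hstep : findTagEndGoB cs (f+1) (p : Int) none
                  = findTagEndGoB cs (f+1) ((p : Int) + 1) none := by
                simp only [findTagEndGoB]
                rw [pv_findFrom_step cs '"' p hplt hq1, pv_findFrom_step cs '\'' p hplt hq2,
                  pv_findFrom_step cs '>' p hplt hq3]
              rw [hstep, hcast]
              exact IH (p+1) none (f+1) (by omega) (by omega)
      · -- in-quote mode
        by_cases hch : cs[p] = qc
        · rw [if_pos hch]
          simp only [findTagEndGoB]
          rw [pv_findFrom_hit cs qc p hplt hch, if_neg (by omega), hcast]
          exact IH (p+1) none f (by omega) (by omega)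
        · rw [if_neg hch]
          have hstep : findTagEndGoB cs (f+1) (p : Int) (some qc)
              = findTagEndGoB cs (f+1) ((p : Int) + 1) (some qc) := by
            simp only [findTagEndGoB]
            rw [pv_findFrom_step cs qc p hplt hch]
          rw [hstep, hcast]
          exact IH (p+1) (some qc) (f+1) (by omega) (by omega)

-- ===== VERDICT (by name: the statement is the Claim_ definition above) =====
theorem find_tag_end_spec : Claim_equal_find_tag_end := by
  intro content start _ hpre
  unfold Pre_find_tag_end at hpre
  unfold Spec_find_tag_end find_tag_end find_tag_end_alt
  obtain ⟨p, hp⟩ : ∃ p : Nat, start + 1 = (p : Int) := ⟨(start + 1).toNat, by omega⟩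
  rw [hp]
  rw [show ((content.toList.length : Int) - (p : Int)).toNat = content.toList.length - p from by omega]
  exact pv_main content.toList (content.toList.length) p none (content.toList.length + 2)
    (by omega) (by omega)
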